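-- pv_equiv track=rewrite | github.com/Hyperiongate/Workforce-Scheduler | shift_algorithm.py | validate_consecutive_shifts
-- ===== SOURCE A (Python) =====
-- from dataclasses import dataclass, field
-- from typing import List, Dict, Tuple, Optional
--
-- @dataclass
-- class ShiftConstants:
--     """Fundamental constraints based on shift length"""
--     shift_length: int
--     max_consecutive_shifts: int
--     annual_days_on: int
--     annual_days_off: int
--     typical_pattern_weeks: List[int]  # Common week patterns (36, 48 hours, etc.)
--     avg_work_hours_per_week: float
--     avg_pay_hours_per_week: float
--
--     @classmethod
--     def for_8_hour(cls):
--         return cls(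
--             shift_length=8,
--             max_consecutive_shifts=7,
--             annual_days_on=273,  # ~74.8% of year
--             annual_days_off=91,   # ~24.9% of year
--             typical_pattern_weeks=[40, 48],  # 75% at 40, 25% at 48
--             avg_work_hours_per_week=42,
--             avg_pay_hours_per_week=43  # Due to overtime on 48-hour weeks
--         )
--
--     @classmethod
--     def for_12_hour(cls):
--         return cls(
--             shift_length=12,
--             max_consecutive_shifts=5,
--             annual_days_on=182,   # 50% of year
--             annual_days_off=182,  # 50% of year
--             typical_pattern_weeks=[36, 48],  # Alternating pattern
--             avg_work_hours_per_week=42,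
--             avg_pay_hours_per_week=44  # More OT due to 48-hour weeks
--         )
--
-- def validate_consecutive_shifts(pattern: List[int], shift_type: str) -> Tuple[bool, str]:
--     """Check if consecutive shift limits are exceeded"""
--     constants = ShiftConstants.for_8_hour() if shift_type == "8-hour" else ShiftConstants.for_12_hour()
--     max_consecutive = constants.max_consecutive_shifts
--
--     consecutive_count = 0
--     max_found = 0
--
--     for day in pattern:
--         if day == 1:  # Working
--             consecutive_count += 1
--             max_found = max(max_found, consecutive_count)
--         else:  # Off
--             consecutive_count = 0
--
--     if max_found > max_consecutive:
--         return False, f"Exceeds maximum {max_consecutive} consecutive {shift_type} shifts (found {max_found})"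
--     return True, "OK"
-- ===== SOURCE B (Python) =====
-- def validate_consecutive_shifts(pattern, shift_type):
--     """Check if consecutive shift limits are exceeded"""
--     max_consecutive = 7 if shift_type == "8-hour" else 5
--     runs = "".join("1" if day == 1 else "0" for day in pattern).split("0")
--     max_found = max(len(run) for run in runs)
--     if max_found > max_consecutive:
--         return False, f"Exceeds maximum {max_consecutive} consecutive {shift_type} shifts (found {max_found})"
--     return True, "OK"
-- ===== Notes on version B (the rewrite author's own statement) =====
-- stated objective: idiomatic
-- what changed: Replaces the consecutive_count/max_found accumulator bookkeeping by materializing the maximal runs of working days (encode the pattern as a 0/1 string, split on '0') and taking the length of the longest piece.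
import Mathlib
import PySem

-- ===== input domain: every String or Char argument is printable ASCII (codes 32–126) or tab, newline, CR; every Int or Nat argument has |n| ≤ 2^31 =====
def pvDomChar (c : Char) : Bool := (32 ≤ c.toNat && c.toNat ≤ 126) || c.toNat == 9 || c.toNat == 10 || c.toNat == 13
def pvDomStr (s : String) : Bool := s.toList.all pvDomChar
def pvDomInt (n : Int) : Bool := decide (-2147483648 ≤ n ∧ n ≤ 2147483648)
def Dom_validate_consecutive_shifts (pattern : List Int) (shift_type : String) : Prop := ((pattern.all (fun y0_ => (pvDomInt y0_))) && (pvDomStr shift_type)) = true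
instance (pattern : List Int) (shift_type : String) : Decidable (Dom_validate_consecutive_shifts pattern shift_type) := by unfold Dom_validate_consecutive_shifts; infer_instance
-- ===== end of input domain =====

-- B replaces A's running consecutive_count/max_found bookkeeping by materializing the
-- maximal runs of working days (encode the pattern as a 0/1 string, split on "0") and
-- taking the length of the longest piece (objective: idiomatic; same O(n) cost).

-- ===== PORT A =====
-- A reads only constants.max_consecutive_shifts from the selected ShiftConstants
-- dataclass (7 for "8-hour", else 5); the other fields (incl. floats) are unused by
-- this function, so the constants selection is ported as the selected integer.
def validate_consecutive_shifts (pattern : List Int) (shift_type : String) : Bool × String :=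
  let max_consecutive : Int := if shift_type == "8-hour" then 7 else 5
  let st := pattern.foldl
    (fun (st : Int × Int) day =>
      if day == 1 then (st.1 + 1, max st.2 (st.1 + 1)) else (0, st.2))
    (0, 0)
  let max_found := st.2
  if max_found > max_consecutive then
    (false, "Exceeds maximum " ++ PySem.Int.toStr max_consecutive ++ " consecutive "
      ++ shift_type ++ " shifts (found " ++ PySem.Int.toStr max_found ++ ")")
  else
    (true, "OK")

-- ===== PORT B =====
def validate_consecutive_shifts_alt (pattern : List Int) (shift_type : String) : Bool × String :=
  let max_consecutive : Int := if shift_type == "8-hour" then 7 else 5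
  -- "".join("1" if day == 1 else "0" for day in pattern).split("0")
  let runs := PySem.Chars.splitOn
    (PySem.Chars.join [] (pattern.map (fun day => if day == 1 then ['1'] else ['0'])))
    ['0']
  -- max(len(run) for run in runs): split always yields at least one piece, so the
  -- list is nonempty and the getD default is never used
  let max_found : Int :=
    (PySem.List.max? (runs.map (fun run => (run.length : Int))) (fun y : Int => y)).getD 0
  if max_found > max_consecutive then
    (false, "Exceeds maximum " ++ PySem.Int.toStr max_consecutive ++ " consecutive "
      ++ shift_type ++ " shifts (found " ++ PySem.Int.toStr max_found ++ ")")
  else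
    (true, "OK")

-- ===== PRECONDITION & SPEC =====
def Spec_validate_consecutive_shifts (pattern : List Int) (shift_type : String) (out : Bool × String) : Prop := out = validate_consecutive_shifts_alt pattern shift_type
instance (pattern : List Int) (shift_type : String) (out : Bool × String) : Decidable (Spec_validate_consecutive_shifts pattern shift_type out) := by unfold Spec_validate_consecutive_shifts; infer_instance

-- ===== CLAIM (what is proved, stated in full; the proofs are below) =====
def Claim_equal_validate_consecutive_shifts : Prop := ∀ (pattern : List Int) (shift_type : String), Dom_validate_consecutive_shifts pattern shift_type → Spec_validate_consecutive_shifts pattern shift_type (validate_consecutive_shifts pattern shift_type)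

-- ===== LEMMAS AND PROOFS =====

-- pure recursive form of PySem.Chars.splitOn on the single-char separator '0'
def splitAux0 : List Char → List Char → List (List Char)
  | [], cur => [cur.reverse]
  | c :: rest, cur => if c = '0' then cur.reverse :: splitAux0 rest [] else splitAux0 rest (c :: cur)

def dayChar (d : Int) : Char := if d == 1 then '1' else '0'

-- the maximum of the piece lengths, as B computes it
def maxPieces (ps : List (List Char)) : Int :=
  match ps.map (fun r => (r.length : Int)) with
  | x :: t => t.foldl max x
  | [] => 0

lemma go_eq_splitAux0 (fuel : Nat) (cs cur : List Char) (acc : List (List Char))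
    (h : cs.length < fuel) :
    PySem.Chars.splitOn.go ['0'] fuel cs cur acc = acc.reverse ++ splitAux0 cs cur := by
  induction fuel generalizing cs cur acc with
  | zero => omega
  | succ fuel ih =>
    cases cs with
    | nil => rw [PySem.Chars.splitOn.go] <;> simp [splitAux0]
    | cons c rest =>
      rw [PySem.Chars.splitOn.go]
      have hlt : rest.length < fuel := by simp at h; omega
      by_cases hc : c = '0'
      · subst hc
        rw [if_pos (by simp [List.isPrefixOf])]
        simp only [List.length_cons, List.length_nil, List.drop_succ_cons, List.drop_zero]
        rw [ih rest [] (cur.reverse :: acc) hlt]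
        simp [splitAux0]
      · rw [if_neg (by simp [List.isPrefixOf]; exact fun hh => hc hh.symm)]
        rw [ih rest (c :: cur) acc hlt]
        simp [splitAux0, hc]

lemma splitOn_eq (cs : List Char) : PySem.Chars.splitOn cs ['0'] = splitAux0 cs [] := by
  rw [PySem.Chars.splitOn, go_eq_splitAux0 _ _ _ _ (by omega)]
  simp

lemma splitAux0_head (cs cur : List Char) :
    ∃ r rest, splitAux0 cs cur = r :: rest ∧ cur.length ≤ r.length := by
  induction cs generalizing cur with
  | nil => exact ⟨cur.reverse, [], by simp [splitAux0]⟩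
  | cons c t ih =>
    by_cases hc : c = '0'
    · exact ⟨cur.reverse, splitAux0 t [], by simp [splitAux0, hc]⟩
    · obtain ⟨r, rest, he, hl⟩ := ih (c :: cur)
      exact ⟨r, rest, by simp [splitAux0, hc, he], by simp at hl; omega⟩

lemma foldl_max_cons (t : List Int) (x y : Int) :
    t.foldl max (max x y) = max x (t.foldl max y) := by
  induction t generalizing x y with
  | nil => simp
  | cons a t ih => simp only [List.foldl_cons, max_assoc]; rw [ih]

lemma maxPieces_cons (a : List Char) (r : List Char) (rest : List (List Char)) :
    maxPieces (a :: r :: rest) = max (a.length : Int) (maxPieces (r :: rest)) := by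
  simp only [maxPieces, List.map_cons, List.foldl_cons]
  rw [foldl_max_cons]

lemma head_le_maxPieces (r : List Char) (rest : List (List Char)) :
    (r.length : Int) ≤ maxPieces (r :: rest) := by
  simp only [maxPieces, List.map_cons]
  exact (PySem.List.le_foldl_max _ _).1

-- A's accumulator loop computes mf ∨ the longest piece of the split, given that cur
-- (the reversed chars of the current partial run) has length cc ≤ mf
lemma foldl_eq_maxPieces (l : List Int) (cc mf : Int) (cur : List Char)
    (h1 : cc ≤ mf) (h2 : (cur.length : Int) = cc) :
    (l.foldl (fun (st : Int × Int) day =>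
        if day == 1 then (st.1 + 1, max st.2 (st.1 + 1)) else (0, st.2)) (cc, mf)).2
      = max mf (maxPieces (splitAux0 (l.map dayChar) cur)) := by
  induction l generalizing cc mf cur with
  | nil =>
    simp [splitAux0, maxPieces]
    omega
  | cons d t ih =>
    by_cases hd : d = 1
    · subst hd
      simp only [List.foldl_cons, List.map_cons, dayChar, beq_self_eq_true, if_true]
      rw [ih (cc+1) (max mf (cc+1)) ('1' :: cur) (le_max_right _ _) (by simp; omega)]
      simp only [splitAux0, if_neg (by decide : ¬ ('1' = '0'))]
      obtain ⟨r, rest, he, hl⟩ := splitAux0_head (t.map dayChar) ('1' :: cur)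
      rw [he]
      have h3 := head_le_maxPieces r rest
      simp at hl
      omega
    · simp only [List.foldl_cons, List.map_cons, dayChar]
      rw [if_neg (by simpa using hd), if_neg (by simpa using hd)]
      rw [ih 0 mf [] (by omega) (by simp)]
      simp only [splitAux0, if_true]
      obtain ⟨r, rest, he, -⟩ := splitAux0_head (t.map dayChar) []
      rw [he, maxPieces_cons]
      have h3 := head_le_maxPieces r rest
      simp only [List.length_reverse]
      omega

theorem ports_agree (pattern : List Int) (shift_type : String) :
    validate_consecutive_shifts pattern shift_type = validate_consecutive_shifts_alt pattern shift_type := by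
  unfold validate_consecutive_shifts validate_consecutive_shifts_alt
  dsimp only
  have hjoin : PySem.Chars.join [] (pattern.map (fun day => if day == 1 then ['1'] else ['0']))
      = pattern.map dayChar := by
    have hm : pattern.map (fun day => if day == 1 then ['1'] else ['0'])
        = List.map (fun c => [c]) (pattern.map dayChar) := by
      rw [List.map_map]
      exact List.map_congr_left (fun a _ => by by_cases h : a = 1 <;> simp [dayChar, h])
    rw [hm, PySem.Chars.join_nil_singletons]
  rw [hjoin, splitOn_eq]
  obtain ⟨r, rest, he, -⟩ := splitAux0_head (pattern.map dayChar) []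
  have hB : ((PySem.List.max? ((splitAux0 (pattern.map dayChar) []).map
        (fun run => (run.length : Int))) (fun y : Int => y)).getD 0)
      = maxPieces (splitAux0 (pattern.map dayChar) []) := by
    rw [he]
    simp only [List.map_cons, PySem.List.max?_id_cons, Option.getD_some, maxPieces]
  have hA := foldl_eq_maxPieces pattern 0 0 [] le_rfl (by simp)
  rw [hB, hA, he]
  have h3 := head_le_maxPieces r rest
  have hmax : max (0:Int) (maxPieces (r :: rest)) = maxPieces (r :: rest) := by
    have h0 : (0:Int) ≤ (r.length : Int) := by positivity
    omega
  rw [hmax]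

-- ===== VERDICT (by name: the statement is the Claim_ definition above) =====
theorem validate_consecutive_shifts_spec : Claim_equal_validate_consecutive_shifts := by
  intro pattern shift_type _
  unfold Spec_validate_consecutive_shifts
  exact ports_agree pattern shift_type
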